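-- pv_equiv track=rewrite | github.com/89million/proj_con | app/voting.py | _build_round_matchups
-- ===== SOURCE A (Python) =====
-- def _next_power_of_2(n: int) -> int:
--     p = 1
--     while p < n:
--         p *= 2
--     return p
--
-- def _bracket_seeding_order(n: int) -> list[int]:
--     """Standard tournament bracket seeding order for *n* slots (power of 2).
--
--     Returns 1-indexed seeds where adjacent pairs form matchups.
--     E.g. n=8 → [1, 8, 4, 5, 2, 7, 3, 6]
--       → matchups: 1v8, 4v5, 2v7, 3v6
--     This guarantees #1 and #2 are in opposite halves and can only meet in the final.
--     """
--     order = [1]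
--     size = 1
--     while size < n:
--         size *= 2
--         new_order = []
--         for s in order:
--             new_order.append(s)
--             new_order.append(size + 1 - s)
--         order = new_order
--     return order
--
-- def _build_round_matchups(
--     season_id: int,
--     round_num: int,
--     ordered_book_ids: list[int],
-- ) -> list[dict]:
--     """
--     Build matchups for one round given an ordered list of book IDs (best first).
--
--     Uses standard tournament bracket seeding so that #1 and #2 are on opposite
--     sides and can only meet in the final. Seeds without a corresponding book
--     (when count is not a power of 2) become byes — stored as matchups where
--     book_a == book_b with winner_id pre-set.
--     """
--     n = len(ordered_book_ids)
--     if n < 2: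
--         return []
--
--     total_slots = _next_power_of_2(n)
--     seeding = _bracket_seeding_order(total_slots)
--
--     matchups = []
--     position = 1
--
--     for i in range(0, total_slots, 2):
--         seed_a = seeding[i] - 1  # convert to 0-indexed
--         seed_b = seeding[i + 1] - 1
--
--         has_a = seed_a < n
--         has_b = seed_b < n
--
--         if has_a and has_b:
--             matchups.append(
--                 {
--                     "season_id": season_id,
--                     "round": round_num,
--                     "position": position,
--                     "book_a_id": ordered_book_ids[seed_a],
--                     "book_b_id": ordered_book_ids[seed_b],
--                 }
--             )
--         elif has_a:
--             book_id = ordered_book_ids[seed_a]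
--             matchups.append(
--                 {
--                     "season_id": season_id,
--                     "round": round_num,
--                     "position": position,
--                     "book_a_id": book_id,
--                     "book_b_id": book_id,
--                     "winner_id": book_id,
--                 }
--             )
--         position += 1
--
--     return matchups
-- ===== SOURCE B (Python) =====
-- def _half_seeding(m: int) -> list[int]:
--     """Bracket seeding order for m slots (m a power of 2), built recursively."""
--     if m == 1:
--         return [1]
--     return [x for s in _half_seeding(m // 2) for x in (s, m + 1 - s)]
--
--
-- def _build_round_matchups(
--     season_id: int,
--     round_num: int,
--     ordered_book_ids: list[int],
-- ) -> list[dict]: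
--     n = len(ordered_book_ids)
--     if n < 2:
--         return []
--     total = 2 ** (n - 1).bit_length()
--     half = _half_seeding(total // 2)
--     return [
--         {
--             "season_id": season_id,
--             "round": round_num,
--             "position": position,
--             "book_a_id": ordered_book_ids[s - 1],
--             "book_b_id": ordered_book_ids[total - s],
--         }
--         if total - s < n
--         else {
--             "season_id": season_id,
--             "round": round_num,
--             "position": position,
--             "book_a_id": ordered_book_ids[s - 1],
--             "book_b_id": ordered_book_ids[s - 1],
--             "winner_id": ordered_book_ids[s - 1],
--         }
--         for position, s in enumerate(half, start=1)
--     ]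
-- ===== Notes on version B (the rewrite author's own statement) =====
-- stated objective: alternative
-- what changed: B builds only the half-size seeding list by divide-and-conquer recursion (instead of A's iterative doubling to the full list) and derives each matchup directly as the pair (s-1, total-s) via a comprehension over enumerate, replacing A's step-2 indexed scan of the full seeding list; total slots come from (n-1).bit_length() instead of a doubling loop.
import Mathlib
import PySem

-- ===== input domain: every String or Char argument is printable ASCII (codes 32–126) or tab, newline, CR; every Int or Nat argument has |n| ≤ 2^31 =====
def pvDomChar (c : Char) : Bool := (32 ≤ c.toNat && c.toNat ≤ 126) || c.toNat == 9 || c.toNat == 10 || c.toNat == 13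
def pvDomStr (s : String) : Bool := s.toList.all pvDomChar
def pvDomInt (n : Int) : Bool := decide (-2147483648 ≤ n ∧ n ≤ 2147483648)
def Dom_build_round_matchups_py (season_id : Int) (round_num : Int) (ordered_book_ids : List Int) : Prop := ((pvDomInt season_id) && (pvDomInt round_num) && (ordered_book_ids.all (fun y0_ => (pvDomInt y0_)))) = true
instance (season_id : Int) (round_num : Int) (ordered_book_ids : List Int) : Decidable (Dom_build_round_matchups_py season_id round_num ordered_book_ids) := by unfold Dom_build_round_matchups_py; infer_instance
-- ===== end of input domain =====

-- B replaces A's "iteratively double the full seeding list, then pair adjacent entries by a step-2 indexed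
-- scan" with "build only the half-size seeding list by divide-and-conquer recursion and pair each seed s
-- with its complement total - s in a comprehension"; objective: a genuinely different algorithm of the
-- same cost.

-- ===== PORT A =====
-- while p < n: p *= 2   (fuel n.toNat is a totality guard only: p grows by at least 1 per iteration)
def npow2_loop : Nat → Int → Int → Int
  | 0, _, p => p
  | f+1, n, p => if p < n then npow2_loop f n (2*p) else p

def next_power_of_2_py (n : Int) : Int := npow2_loop n.toNat n 1

-- while size < n: size *= 2; new_order = []; for s in order: append s; append size+1-s
-- (fuel n.toNat is a totality guard only: size grows by at least 1 per iteration)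
def seed_loop : Nat → Int → List Int → Int → List Int
  | 0, _, order, _ => order
  | f+1, n, order, size =>
    if size < n then
      seed_loop f n (order.foldl (fun new_order s => new_order ++ [s, (2*size) + 1 - s]) []) (2*size)
    else order

def bracket_seeding_order_py (n : Int) : List Int := seed_loop n.toNat n [1] 1

-- all list indices reached here are in range (proved below), so pyGetD's default is never used
def build_round_matchups_py (season_id : Int) (round_num : Int) (ordered_book_ids : List Int) : List (List (String × Int)) :=
  let n : Int := ordered_book_ids.length
  if n < 2 then [] else
  let total_slots := next_power_of_2_py n
  let seeding := bracket_seeding_order_py total_slots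
  let res := (PySem.List.pyRange 0 total_slots 2).foldl
    (fun (st : List (List (String × Int)) × Int) i =>
      if PySem.List.pyGetD seeding i 0 - 1 < n ∧ PySem.List.pyGetD seeding (i+1) 0 - 1 < n then
        (st.1 ++ [[("season_id", season_id), ("round", round_num), ("position", st.2),
                   ("book_a_id", PySem.List.pyGetD ordered_book_ids (PySem.List.pyGetD seeding i 0 - 1) 0),
                   ("book_b_id", PySem.List.pyGetD ordered_book_ids (PySem.List.pyGetD seeding (i+1) 0 - 1) 0)]], st.2 + 1)
      else if PySem.List.pyGetD seeding i 0 - 1 < n then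
        (st.1 ++ [[("season_id", season_id), ("round", round_num), ("position", st.2),
                   ("book_a_id", PySem.List.pyGetD ordered_book_ids (PySem.List.pyGetD seeding i 0 - 1) 0),
                   ("book_b_id", PySem.List.pyGetD ordered_book_ids (PySem.List.pyGetD seeding i 0 - 1) 0),
                   ("winner_id", PySem.List.pyGetD ordered_book_ids (PySem.List.pyGetD seeding i 0 - 1) 0)]], st.2 + 1)
      else (st.1, st.2 + 1))
    ([], 1)
  res.1

-- ===== PORT B =====
-- if m == 1: return [1]; return [x for s in _half_seeding(m // 2) for x in (s, m+1-s)]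
-- (fuel is a totality guard only; the caller passes m.toNat, enough since m halves each call)
def half_seeding : Nat → Int → List Int
  | 0, _ => [1]
  | f+1, m => if m = 1 then [1]
      else (half_seeding f (PySem.Int.floordiv m 2)).flatMap (fun s => [s, m + 1 - s])

-- total = 2 ** (n-1).bit_length(); indices s-1 and total-s (when taken) are in range (proved below)
def build_round_matchups_py_alt (season_id : Int) (round_num : Int) (ordered_book_ids : List Int) : List (List (String × Int)) :=
  let n : Int := ordered_book_ids.length
  if n < 2 then [] else
  let total : Int := 2 ^ (PySem.Int.bitLength (n - 1))
  let halfm := PySem.Int.floordiv total 2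
  let half := half_seeding halfm.toNat halfm
  (PySem.List.enumerate half 1).map (fun p =>
    if total - p.2 < n then
      [("season_id", season_id), ("round", round_num), ("position", p.1),
       ("book_a_id", PySem.List.pyGetD ordered_book_ids (p.2 - 1) 0),
       ("book_b_id", PySem.List.pyGetD ordered_book_ids (total - p.2) 0)]
    else
      [("season_id", season_id), ("round", round_num), ("position", p.1),
       ("book_a_id", PySem.List.pyGetD ordered_book_ids (p.2 - 1) 0),
       ("book_b_id", PySem.List.pyGetD ordered_book_ids (p.2 - 1) 0),
       ("winner_id", PySem.List.pyGetD ordered_book_ids (p.2 - 1) 0)])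

-- ===== PRECONDITION & SPEC =====
def Spec_build_round_matchups_py (season_id : Int) (round_num : Int) (ordered_book_ids : List Int) (out : List (List (String × Int))) : Prop := out = build_round_matchups_py_alt season_id round_num ordered_book_ids
instance (season_id : Int) (round_num : Int) (ordered_book_ids : List Int) (out : List (List (String × Int))) : Decidable (Spec_build_round_matchups_py season_id round_num ordered_book_ids out) := by unfold Spec_build_round_matchups_py; infer_instance

-- ===== CLAIM (what is proved, stated in full; the proofs are below) =====
def Claim_equal_build_round_matchups_py : Prop := ∀ (season_id : Int) (round_num : Int) (ordered_book_ids : List Int), Dom_build_round_matchups_py season_id round_num ordered_book_ids → Spec_build_round_matchups_py season_id round_num ordered_book_ids (build_round_matchups_py season_id round_num ordered_book_ids)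

-- ===== LEMMAS AND PROOFS =====

-- the canonical bracket seeding list for 2^k slots
def T : Nat → List Int
  | 0 => [1]
  | k+1 => (T k).flatMap (fun s => [s, 2^(k+1) + 1 - s])

theorem T_length (k : Nat) : (T k).length = 2^k := by
  induction k with
  | zero => rfl
  | succ k ih =>
      simp [T, List.length_flatMap, ih, pow_succ]

theorem T_mem (k : Nat) : ∀ s ∈ T k, 1 ≤ s ∧ s ≤ 2^k := by
  induction k with
  | zero => intro s hs; simp [T] at hs; omega
  | succ k ih =>
      intro s hs
      simp only [T, List.mem_flatMap] at hs
      obtain ⟨a, ha, hs⟩ := hs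
      obtain ⟨h1, h2⟩ := ih a ha
      have hpow : (2:Int)^(k+1) = 2 * 2^k := by rw [pow_succ]; ring
      simp [List.mem_cons] at hs
      have hk : (1:Int) ≤ 2^k := one_le_pow₀ one_le_two
      rcases hs with h | h <;> subst h <;> constructor <;> omega

theorem npow2_ge : ∀ (f : Nat) (n p : Int), 1 ≤ p → n ≤ p + f → n ≤ npow2_loop f n p := by
  intro f
  induction f with
  | zero => intro n p h1 h2; simpa [npow2_loop] using by omega
  | succ f ih =>
      intro n p h1 h2
      simp only [npow2_loop]
      split_ifs with h
      · exact ih n (2*p) (by omega) (by push_cast at h2 ⊢; omega)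
      · omega

theorem npow2_pow : ∀ (f : Nat) (n p : Int) (j : Nat), p = 2^j → p < 2*n →
    ∃ j' : Nat, npow2_loop f n p = 2^j' ∧ (2:Int)^j' < 2*n := by
  intro f
  induction f with
  | zero => intro n p j hp hlt; exact ⟨j, by simpa [npow2_loop] using hp, hp ▸ hlt⟩
  | succ f ih =>
      intro n p j hp hlt
      simp only [npow2_loop]
      split_ifs with h
      · exact ih n (2*p) (j+1) (by rw [hp, pow_succ]; ring) (by omega)
      · exact ⟨j, hp, hp ▸ hlt⟩

theorem npow2_char (n : Int) (h2 : 2 ≤ n) :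
    ∃ k : Nat, 1 ≤ k ∧ next_power_of_2_py n = 2^k ∧ n ≤ 2^k ∧ (2:Int)^k < 2*n := by
  have hge : n ≤ npow2_loop n.toNat n 1 := npow2_ge n.toNat n 1 le_rfl (by omega)
  obtain ⟨k, hk, hlt⟩ := npow2_pow n.toNat n 1 0 (by norm_num) (by omega)
  refine ⟨k, ?_, hk, hk ▸ hge, hlt⟩
  by_contra h
  have hk0 : k = 0 := by omega
  subst hk0
  rw [hk] at hge
  norm_num at hge
  omega

theorem seed_char : ∀ (f k j : Nat), j ≤ k → k - j ≤ f →
    seed_loop f ((2:Int)^k) (T j) ((2:Int)^j) = T k := by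
  intro f
  induction f with
  | zero =>
      intro k j hjk hf
      have : j = k := by omega
      subst this
      rfl
  | succ f ih =>
      intro k j hjk hf
      simp only [seed_loop]
      split_ifs with h
      · have hjk' : j < k := by
          by_contra hc
          have : j = k := by omega
          subst this
          exact absurd h (lt_irrefl _)
        rw [PySem.List.foldl_append_eq_flatMap]
        have h2 : (2:Int) * 2^j = 2^(j+1) := by rw [pow_succ]; ring
        have hT : (T j).flatMap (fun s => [s, 2*(2:Int)^j + 1 - s]) = T (j+1) := by
          simp only [T, h2]
        rw [List.nil_append, hT, h2]
        exact ih k (j+1) (by omega) (by omega)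
      · have : ¬ j < k := by
          intro hc
          exact h (pow_lt_pow_right₀ one_lt_two hc)
        have : j = k := by omega
        subst this
        rfl

theorem bracket_char (k : Nat) : bracket_seeding_order_py ((2:Int)^k) = T k := by
  have ht : ((2:Int)^k).toNat = 2^k := by
    have : ((2:Int)^k) = ((2^k : Nat) : Int) := by push_cast; ring
    rw [this, Int.toNat_natCast]
  have := seed_char ((2:Int)^k).toNat k 0 (Nat.zero_le k) (by rw [ht]; have := @Nat.lt_two_pow_self k; omega)
  simpa [bracket_seeding_order_py, T] using this

theorem half_char : ∀ (f j : Nat), j ≤ f → half_seeding f ((2:Int)^j) = T j := by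
  intro f
  induction f with
  | zero =>
      intro j hj
      have : j = 0 := by omega
      subst this; rfl
  | succ f ih =>
      intro j hj
      cases j with
      | zero => rfl
      | succ j =>
          have hne : ((2:Int)^(j+1)) ≠ 1 := by
            have : (2:Int)^(j+1) = 2 * 2^j := by rw [pow_succ]; ring
            have h1 : (1:Int) ≤ 2^j := one_le_pow₀ one_le_two
            omega
          have hdiv : PySem.Int.floordiv ((2:Int)^(j+1)) 2 = 2^j := by
            rw [PySem.Int.floordiv_eq_ediv_of_pos (by norm_num), pow_succ]
            exact Int.mul_ediv_cancel _ (by norm_num)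
          simp only [half_seeding, if_neg hne, hdiv, ih j (by omega)]
          simp [T]

theorem pow_int_unique (n : Int) (a b : Nat) (ha1 : n ≤ 2^a) (ha2 : (2:Int)^a < 2*n)
    (hb1 : n ≤ 2^b) (hb2 : (2:Int)^b < 2*n) : a = b := by
  rcases lt_trichotomy a b with h | h | h
  · exfalso
    have : (2:Int)^(a+1) ≤ 2^b := pow_le_pow_right₀ one_le_two (by omega)
    rw [pow_succ] at this
    omega
  · exact h
  · exfalso
    have : (2:Int)^(b+1) ≤ 2^a := pow_le_pow_right₀ one_le_two (by omega)
    rw [pow_succ] at this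
    omega

theorem pyGetD_cons_add_one (x d : Int) (xs : List Int) {i : Int} (hi : 0 ≤ i) :
    PySem.List.pyGetD (x :: xs) (i+1) d = PySem.List.pyGetD xs i d := by
  rw [PySem.List.pyGetD_of_nonneg _ _ (by omega), PySem.List.pyGetD_of_nonneg _ _ hi]
  have h : (i+1).toNat = i.toNat + 1 := by omega
  simp [h]

theorem pyRange_two (m : Nat) :
    PySem.List.pyRange 0 (2*((m:Int)+1)) 2 = 0 :: (PySem.List.pyRange 0 (2*(m:Int)) 2).map (· + 2) := by
  rw [PySem.List.pyRange_of_pos _ _ (by norm_num), PySem.List.pyRange_of_pos _ _ (by norm_num)]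
  have h1 : (0:Int) < 2*((m:Int)+1) := by positivity
  rw [if_pos h1]
  have hc1 : ((2*((m:Int)+1) - 0 + 2 - 1)/2).toNat = m + 1 := by omega
  rw [hc1, List.range_succ_eq_map]
  rcases Nat.eq_zero_or_pos m with hm | hm
  · subst hm; simp
  · rw [if_pos (by omega)]
    have hc2 : ((2*((m:Int)) - 0 + 2 - 1)/2).toNat = m := by omega
    rw [hc2]
    simp only [List.map_cons, List.map_map, Nat.cast_zero]
    ring_nf
    congr 1
    apply List.map_congr_left
    intro k _
    simp only [Function.comp_apply]
    push_cast
    ring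

theorem fold_chunks {σ : Type} (g : Int → Int) (f : σ → Int → Int → σ) :
    ∀ (h : List Int) (st : σ),
      (PySem.List.pyRange 0 (2*((h.length:Int))) 2).foldl
        (fun st i => f st (PySem.List.pyGetD (h.flatMap (fun s => [s, g s])) i 0)
                          (PySem.List.pyGetD (h.flatMap (fun s => [s, g s])) (i+1) 0)) st
      = h.foldl (fun st s => f st s (g s)) st
  | [], st => by
      simp [PySem.List.pyRange]
  | x :: t, st => by
      have hlen : (2*(((x::t).length:Int))) = 2*(((t.length:Int))+1) := by
        push_cast [List.length_cons]; ring
      rw [hlen, pyRange_two]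
      simp only [List.foldl_cons, List.foldl_map, List.flatMap_cons, List.cons_append, List.nil_append]
      have e0 : PySem.List.pyGetD (x :: g x :: t.flatMap (fun s => [s, g s])) 0 0 = x := by
        rw [PySem.List.pyGetD_of_nonneg _ _ (by norm_num)]; rfl
      have e1 : PySem.List.pyGetD (x :: g x :: t.flatMap (fun s => [s, g s])) (0+1) 0 = g x := by
        rw [PySem.List.pyGetD_of_nonneg _ _ (by norm_num)]; rfl
      rw [e0, e1]
      have hcongr := PySem.List.foldl_congr_mem
        (PySem.List.pyRange 0 (2*((t.length:Int))) 2)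
        (fun st i => f st (PySem.List.pyGetD (x :: g x :: t.flatMap (fun s => [s, g s])) (i+2) 0)
                          (PySem.List.pyGetD (x :: g x :: t.flatMap (fun s => [s, g s])) (i+2+1) 0))
        (fun st i => f st (PySem.List.pyGetD (t.flatMap (fun s => [s, g s])) i 0)
                          (PySem.List.pyGetD (t.flatMap (fun s => [s, g s])) (i+1) 0))
        (f st x (g x))
        (by
          intro acc i hi
          have h0 : 0 ≤ i := by
            have := (PySem.List.mem_pyRange_iff_of_pos (by norm_num : (0:Int) < 2) i).mp hi
            omega
          have r1 : PySem.List.pyGetD (x :: g x :: t.flatMap (fun s => [s, g s])) (i+2) 0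
              = PySem.List.pyGetD (t.flatMap (fun s => [s, g s])) i 0 := by
            have : i + 2 = (i + 1) + 1 := by ring
            rw [this, pyGetD_cons_add_one _ _ _ (by omega), pyGetD_cons_add_one _ _ _ h0]
          have r2 : PySem.List.pyGetD (x :: g x :: t.flatMap (fun s => [s, g s])) (i+2+1) 0
              = PySem.List.pyGetD (t.flatMap (fun s => [s, g s])) (i+1) 0 := by
            have : i + 2 + 1 = ((i + 1) + 1) + 1 := by ring
            rw [this, pyGetD_cons_add_one _ _ _ (by omega), pyGetD_cons_add_one _ _ _ (by omega)]
          simp only [r1, r2])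
      rw [hcongr]
      exact fold_chunks g f t (f st x (g x))

theorem fold_counter {ρ : Type} (g : Int → Int → ρ) :
    ∀ (h : List Int) (acc : List ρ) (pos : Int),
      h.foldl (fun (st : List ρ × Int) s => (st.1 ++ [g st.2 s], st.2 + 1)) (acc, pos)
      = (acc ++ (PySem.List.enumerate h pos).map (fun p => g p.1 p.2), pos + h.length)
  | [], acc, pos => by simp [PySem.List.enumerate]
  | x :: t, acc, pos => by
      simp only [List.foldl_cons, PySem.List.enumerate_cons, List.map_cons]
      rw [fold_counter g t (acc ++ [g pos x]) (pos + 1)]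
      simp [List.length_cons]
      ring

theorem fold_body_eq {G : Int → Int → List (String × Int)}
    (h : List Int)
    (F : (List (List (String × Int)) × Int) → Int → (List (List (String × Int)) × Int))
    (hF : ∀ st s, s ∈ h → F st s = (st.1 ++ [G st.2 s], st.2 + 1)) (acc : List (List (String × Int))) (pos : Int) :
    h.foldl F (acc, pos) = (acc ++ (PySem.List.enumerate h pos).map (fun p => G p.1 p.2), pos + h.length) := by
  rw [PySem.List.foldl_congr_mem h F (fun st s => (st.1 ++ [G st.2 s], st.2 + 1)) (acc, pos)
    (fun st s hs => hF st s hs)]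
  exact fold_counter G h acc pos

-- ===== VERDICT (by name: the statement is the Claim_ definition above) =====
theorem build_round_matchups_py_spec : Claim_equal_build_round_matchups_py := by
  intro season_id round_num obi _dom
  unfold Spec_build_round_matchups_py
  by_cases hlt : ((obi.length : Int) < 2)
  · simp [build_round_matchups_py, build_round_matchups_py_alt, hlt]
  · set n : Int := (obi.length : Int) with hn
    have h2 : 2 ≤ n := by omega
    obtain ⟨k, hk1, hA, hle, hltk⟩ := npow2_char n h2
    set L := PySem.Int.bitLength (n - 1) with hLdef
    have hb1 : n ≤ (2:Int)^L := by
      have h0 := PySem.Int.lt_two_pow_bitLength (n-1)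
      have h0' : ((n-1).natAbs : Int) < ((2^L : Nat) : Int) := by exact_mod_cast h0
      rw [Int.natAbs_of_nonneg (by omega)] at h0'
      push_cast at h0'
      linarith [Int.add_one_le_iff.mpr h0']
    have hL1 : 1 ≤ L := by
      by_contra hc
      have : L = 0 := by omega
      rw [this] at hb1
      norm_num at hb1
      omega
    have hb2 : (2:Int)^L < 2*n := by
      have h0 := PySem.Int.two_pow_bitLength_le (n-1) (by omega)
      have h0' : ((2^(L-1) : Nat) : Int) ≤ ((n-1).natAbs : Int) := by exact_mod_cast h0
      rw [Int.natAbs_of_nonneg (by omega)] at h0'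
      push_cast at h0'
      have hsplit : (2:Int)^L = 2^(L-1) * 2 := by
        rw [← pow_succ, show L - 1 + 1 = L by omega]
      rw [hsplit]
      linarith
    have hkL : k = L := pow_int_unique n k L hle hltk hb1 hb2
    simp only [build_round_matchups_py, build_round_matchups_py_alt, if_neg hlt, ← hn]
    have hbit : PySem.Int.bitLength (n - 1) = k := by rw [hkL, hLdef]
    rw [hA, hbit, bracket_char]
    have hdiv : PySem.Int.floordiv ((2:Int)^k) 2 = 2^(k-1) := by
      rw [PySem.Int.floordiv_eq_ediv_of_pos (by norm_num),
        show k = (k-1)+1 by omega, pow_succ]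
      exact Int.mul_ediv_cancel _ (by norm_num)
    have htn : ((2:Int)^(k-1)).toNat = 2^(k-1) := by
      rw [show (2:Int)^(k-1) = ((2^(k-1) : Nat) : Int) by push_cast; ring, Int.toNat_natCast]
    rw [hdiv, htn, half_char _ _ (by have := @Nat.lt_two_pow_self (k-1); omega)]
    have hTk : T k = (T (k-1)).flatMap (fun s => [s, (2:Int)^k + 1 - s]) := by
      conv_lhs => rw [show k = (k-1)+1 by omega]
      rw [show T ((k-1)+1) = (T (k-1)).flatMap (fun s => [s, 2^((k-1)+1) + 1 - s]) from rfl,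
        show (k-1)+1 = k by omega]
    have hrange : PySem.List.pyRange 0 ((2:Int)^k) 2
        = PySem.List.pyRange 0 (2*(((T (k-1)).length : Int))) 2 := by
      congr 1
      rw [T_length]
      push_cast
      rw [show (2:Int)^k = 2^(k-1)*2 from by rw [← pow_succ, show k-1+1=k by omega]]
      ring
    rw [hTk, hrange,
      fold_chunks (fun s => (2:Int)^k + 1 - s)
        (fun st a b =>
          if a - 1 < n ∧ b - 1 < n then
            (st.1 ++ [[("season_id", season_id), ("round", round_num), ("position", st.2),
                       ("book_a_id", PySem.List.pyGetD obi (a - 1) 0),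
                       ("book_b_id", PySem.List.pyGetD obi (b - 1) 0)]], st.2 + 1)
          else if a - 1 < n then
            (st.1 ++ [[("season_id", season_id), ("round", round_num), ("position", st.2),
                       ("book_a_id", PySem.List.pyGetD obi (a - 1) 0),
                       ("book_b_id", PySem.List.pyGetD obi (a - 1) 0),
                       ("winner_id", PySem.List.pyGetD obi (a - 1) 0)]], st.2 + 1)
          else (st.1, st.2 + 1))
        (T (k-1)) ([], 1)]
    have hhalf : (2:Int)^(k-1) < n := by
      have : (2:Int)^k = 2^(k-1) * 2 := by
        rw [← pow_succ, show k - 1 + 1 = k by omega]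
      omega
    rw [fold_body_eq (G := fun pos s =>
        if (2:Int)^k + 1 - s - 1 < n then
          [("season_id", season_id), ("round", round_num), ("position", pos),
           ("book_a_id", PySem.List.pyGetD obi (s - 1) 0),
           ("book_b_id", PySem.List.pyGetD obi ((2:Int)^k + 1 - s - 1) 0)]
        else
          [("season_id", season_id), ("round", round_num), ("position", pos),
           ("book_a_id", PySem.List.pyGetD obi (s - 1) 0),
           ("book_b_id", PySem.List.pyGetD obi (s - 1) 0),
           ("winner_id", PySem.List.pyGetD obi (s - 1) 0)])
      (T (k-1)) _ ?_ [] 1]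
    · simp only [List.nil_append]
      apply List.map_congr_left
      intro p hp
      obtain ⟨j, hj, hpj⟩ := (PySem.List.mem_enumerate_iff (T (k-1)) 1 p).mp hp
      have hsmem : p.2 ∈ T (k-1) := by rw [hpj]; exact List.getElem_mem hj
      obtain ⟨hs1, hs2⟩ := T_mem (k-1) p.2 hsmem
      have harith : (2:Int)^k + 1 - p.2 - 1 = 2^k - p.2 := by ring
      rw [harith]
    · intro st s hs
      obtain ⟨hs1, hs2⟩ := T_mem (k-1) s hs
      have ha : s - 1 < n := by omega
      by_cases hb : (2:Int)^k + 1 - s - 1 < n <;> simp [ha, hb]
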